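-- pv_equiv track=rewrite | github.com/jamespaulzhang/Sorbonne_University | Sorbonne_University_Projects/LU3IN025 - Intelligence Artificielle et Jeux - S2-24/Projet_GaleShapley/projet.py | gale_shapley_etudiants
-- ===== SOURCE A (Python) =====
-- from collections import deque
-- import heapq
--
-- def gale_shapley_etudiants(CE, CP, capacites):
--     n = len(CE)  # Nombre d'étudiants
--     m = len(CP)  # Nombre de parcours
--
--     # 1. Trouver un étudiant libre : deque permet un accès rapide en O(n)
--     etudiants_libres = deque(range(n))  # File des étudiants libres
--
--     # 2. Prochain parcours à proposer : tableau pour accès direct en O(n)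
--     prochain_parcours = [0] * n  # Indice du prochain parcours que chaque étudiant va proposer
--
--     # 3. Classement des étudiants pour chaque parcours : dictionnaire pour accès rapide en O(n*m)
--     classement_parcours = [{etudiant: rang for rang, etudiant in enumerate(CP[j])} for j in range(m)]
--
--     # 4. Affectations des parcours : heapq pour trouver l'étudiant le moins préféré en O(m*log k) car O(log k) par insertion/suppression
--     affectations = {j: [] for j in range(m)}
--
--     # 5. Capacités restantes pour chaque parcours : tableau pour accès direct en O(m)
--     capacite_restante = capacites[:]
--
--     while etudiants_libres:
--         i = etudiants_libres.popleft()  # O(1)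
--
--         while prochain_parcours[i] < m:
--             j = CE[i][prochain_parcours[i]]  # O(1)
--             prochain_parcours[i] += 1
--
--             if capacite_restante[j] > 0:
--                 heapq.heappush(affectations[j], (-classement_parcours[j][i], i))  # O(log k)
--                 capacite_restante[j] -= 1  # O(1)
--                 break
--             else:
--                 moins_prefere_rang, moins_prefere = affectations[j][0]  # O(1)
--
--                 if classement_parcours[j][i] < -moins_prefere_rang:
--                     heapq.heappop(affectations[j])  # O(k)
--                     etudiants_libres.append(moins_prefere)  # O(1)
--                     heapq.heappush(affectations[j], (-classement_parcours[j][i], i))  # O(k)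
--                     break
--
--     result = {j: [etudiant for _, etudiant in sorted(affectations[j])] for j in range(m)}
--     return result
-- ===== SOURCE B (Python) =====
-- def gale_shapley_etudiants(CE, CP, capacites):
--     n, m = len(CE), len(CP)
--     rang = [{e: r for r, e in enumerate(CP[j])} for j in range(m)]
--     reste = list(capacites)
--     prochain = [0] * n
--     aff = [[] for _ in range(m)]
--     file = list(range(n))  # head of the list is the current proposer
--     while file:
--         i = file[0]
--         p = prochain[i]
--         if p >= m:
--             file.pop(0)
--             continue
--         j = CE[i][p]
--         prochain[i] = p + 1
--         if reste[j] > 0: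
--             aff[j].append(i)
--             reste[j] -= 1
--             file.pop(0)
--         else:
--             pire = max(aff[j], key=lambda e: (rang[j][e], -e))
--             if rang[j][i] < rang[j][pire]:
--                 aff[j].remove(pire)
--                 aff[j].append(i)
--                 file.pop(0)
--                 file.append(pire)
--     return {j: sorted(aff[j], key=lambda e: (-rang[j][e], e)) for j in range(m)}
-- ===== Notes on version B (the rewrite author's own statement) =====
-- stated objective: alternative
-- what changed: Replaces A's two nested loops (deque of free students, inner per-student proposal loop) and heapq min-heap of (-rank, student) pairs by a single flat event loop over one list-queue that performs exactly one proposal per iteration (the current proposer stays at the head until placed or exhausted), stores each parcours's students in a plain list, finds the least-preferred assigned student with max(key=(rank,-id)), and sorts each list once at the end.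
-- outside the precondition, e.g. on gale_shapley_etudiants([[0]], [[0], [0]], [1, 1]): A returns {0: [0], 1: []}, B returns {0: [0], 1: []}; on gale_shapley_etudiants([[0, 1]], [[0], [0]], [1, 0]): A returns {0: [0], 1: []}, B returns {0: [0], 1: []}; on gale_shapley_etudiants([[0, 1]], [[0], []], [1, 1]): A returns {0: [0], 1: []}, B returns {0: [0], 1: []}
import Mathlib
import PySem

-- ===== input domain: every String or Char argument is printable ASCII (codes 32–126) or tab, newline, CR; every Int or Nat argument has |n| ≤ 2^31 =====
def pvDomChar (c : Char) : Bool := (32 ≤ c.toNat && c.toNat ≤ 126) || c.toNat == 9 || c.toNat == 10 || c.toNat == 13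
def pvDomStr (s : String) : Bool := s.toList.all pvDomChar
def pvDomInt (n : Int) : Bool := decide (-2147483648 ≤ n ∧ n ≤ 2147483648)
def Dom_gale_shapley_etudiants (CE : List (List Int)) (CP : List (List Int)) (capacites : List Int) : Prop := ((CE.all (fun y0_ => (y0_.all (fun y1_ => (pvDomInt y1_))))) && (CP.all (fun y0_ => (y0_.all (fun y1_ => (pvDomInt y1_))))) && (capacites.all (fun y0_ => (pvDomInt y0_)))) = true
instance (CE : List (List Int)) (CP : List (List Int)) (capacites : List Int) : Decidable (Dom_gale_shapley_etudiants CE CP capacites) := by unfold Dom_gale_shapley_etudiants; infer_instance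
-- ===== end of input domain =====

-- B replaces A's two nested loops (deque + per-student inner proposal loop) and its heapq
-- min-heap of (-rank, student) pairs by a single flat event loop: one list-queue, exactly one
-- proposal per iteration (the proposer stays at the head until placed or exhausted), plain
-- per-parcours student lists with a max(key=(rank,-id)) scan, and one final sort per parcours.
-- Objective: alternative (no heap, no nested loop).

-- ===== PORT A =====
-- dict comprehension {etudiant: rang for rang, etudiant in enumerate(CP[j])} (same line in A and B)
def pvRanks (CP : List (List Int)) : List (PySem.Dict Int Int) :=
  CP.map (fun row => (PySem.List.enumerate row).foldl (fun d p => d.insert p.2 p.1) PySem.Dict.empty)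

-- classement_parcours[j][i] / rang[j][e]; the KeyError (absent key) is excluded by Pre_, where the
-- default 0 is never used.
def pvRank (ranks : List (PySem.Dict Int Int)) (j e : Int) : Int :=
  (PySem.List.pyGetD ranks j PySem.Dict.empty).getD e 0

-- Python tuple comparison (a, b) <= (c, d) on int pairs
def pvPairLe (a b : Int × Int) : Bool := a.1 < b.1 || (a.1 == b.1 && a.2 ≤ b.2)

-- heapq.heappush / heappop are ported as insertion into (removal from the front of) an ascending
-- ordered list: every observation A makes of the heap — affectations[j][0] is the minimum, heappop
-- removes the minimum, and the final sorted(affectations[j]) of its contents — coincides exactly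
-- with Python's binary-heap array on every input.
def pvHeapPush (x : Int × Int) : List (Int × Int) → List (Int × Int)
  | [] => [x]
  | a :: t => if pvPairLe x a then x :: a :: t else a :: pvHeapPush x t

-- the inner `while prochain_parcours[i] < m` loop of A; returns (prochain, affectations, reste,
-- displaced student appended to the free deque, if any); fuel m+1 bounds its ≤ m iterations.
def pvInnerA (CE : List (List Int)) (ranks : List (PySem.Dict Int Int)) (m : Int) (i : Int) :
    Nat → List Int → List (List (Int × Int)) → List Int →
    List Int × List (List (Int × Int)) × List Int × Option Int
  | 0, proch, aff, reste => (proch, aff, reste, none)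
  | fuel + 1, proch, aff, reste =>
    if PySem.List.pyGetD proch i 0 < m then
      let j := PySem.List.pyGetD (PySem.List.pyGetD CE i []) (PySem.List.pyGetD proch i 0) 0
      let proch' := PySem.List.pySetD proch i (PySem.List.pyGetD proch i 0 + 1)
      if 0 < PySem.List.pyGetD reste j 0 then
        (proch',
         PySem.List.pySetD aff j (pvHeapPush (-(pvRank ranks j i), i) (PySem.List.pyGetD aff j [])),
         PySem.List.pySetD reste j (PySem.List.pyGetD reste j 0 - 1), none)
      else
        let top := (PySem.List.pyGetD aff j []).headD (0, 0)
        if pvRank ranks j i < -top.1 then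
          (proch',
           PySem.List.pySetD aff j (pvHeapPush (-(pvRank ranks j i), i) (PySem.List.pyGetD aff j []).tail),
           reste, some top.2)
        else
          pvInnerA CE ranks m i fuel proch' aff reste
    else (proch, aff, reste, none)

-- the outer `while etudiants_libres` loop; fuel n*m+n+1 bounds its ≤ n + n*m iterations
-- (every proposal advances some prochain_parcours entry, every requeue follows a proposal).
def pvOuterA (CE : List (List Int)) (ranks : List (PySem.Dict Int Int)) (m : Int) :
    Nat → List Int → List Int → List (List (Int × Int)) → List Int → List (List (Int × Int))
  | 0, _, _, aff, _ => aff
  | _ + 1, [], _, aff, _ => aff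
  | fuel + 1, i :: rest, proch, aff, reste =>
    match pvInnerA CE ranks m i (m.toNat + 1) proch aff reste with
    | (proch', aff', reste', disp) =>
        pvOuterA CE ranks m fuel (rest ++ disp.toList) proch' aff' reste'

def gale_shapley_etudiants (CE : List (List Int)) (CP : List (List Int)) (capacites : List Int) :
    List (Int × List Int) :=
  let n := CE.length
  let m := CP.length
  let ranks := pvRanks CP
  let final := pvOuterA CE ranks (m : Int) (n * m + n + 1) (PySem.List.pyRange 0 n 1)
      (List.replicate n 0) (List.replicate m []) capacites
  (PySem.List.pyRange 0 (m : Int) 1).map (fun j =>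
    (j, (PySem.List.sorted2 (PySem.List.pyGetD final j []) (fun p => p.1) (fun p => p.2) false).map
      (fun p => p.2)))

-- ===== PORT B =====
-- B's single flat `while file:` loop: one proposal (or one pop of an exhausted student) per
-- iteration, the current proposer at the head of the list-queue; each iteration either pops a
-- queue element or advances some prochain entry, so fuel 2*n*m + n + 1 bounds the iterations.
-- On the inputs Pre_ excludes Python raises (IndexError on prochain[i]/CE[i][p], ValueError on
-- max([])); the port returns the current aff there — unreachable under Pre_.
def pvFlatB (CE : List (List Int)) (ranks : List (PySem.Dict Int Int)) (m : Int) :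
    Nat → List Int → List Int → List (List Int) → List Int → List (List Int)
  | 0, _, _, aff, _ => aff
  | _ + 1, [], _, aff, _ => aff
  | fuel + 1, i :: rest, proch, aff, reste =>
    if PySem.List.pyGetD proch i 0 < m then
      let j := PySem.List.pyGetD (PySem.List.pyGetD CE i []) (PySem.List.pyGetD proch i 0) 0
      let proch' := PySem.List.pySetD proch i (PySem.List.pyGetD proch i 0 + 1)
      if 0 < PySem.List.pyGetD reste j 0 then
        pvFlatB CE ranks m fuel rest proch'
          (PySem.List.pySetD aff j (PySem.List.pyGetD aff j [] ++ [i]))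
          (PySem.List.pySetD reste j (PySem.List.pyGetD reste j 0 - 1))
      else
        match PySem.List.max2? (PySem.List.pyGetD aff j [])
            (fun e => pvRank ranks j e) (fun e => -e) with
        | none => aff   -- max([]) raises ValueError in Python; unreachable under Pre_
        | some pire =>
          if pvRank ranks j i < pvRank ranks j pire then
            pvFlatB CE ranks m fuel (rest ++ [pire]) proch'
              (PySem.List.pySetD aff j
                (((PySem.List.remove? (PySem.List.pyGetD aff j []) pire).getD
                  (PySem.List.pyGetD aff j [])) ++ [i]))
              reste
          else
            pvFlatB CE ranks m fuel (i :: rest) proch' aff reste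
    else
      pvFlatB CE ranks m fuel rest proch aff reste

def gale_shapley_etudiants_alt (CE : List (List Int)) (CP : List (List Int)) (capacites : List Int) :
    List (Int × List Int) :=
  let n := CE.length
  let m := CP.length
  let ranks := pvRanks CP
  let final := pvFlatB CE ranks (m : Int) (2 * (n * m) + n + 1) (PySem.List.pyRange 0 n 1)
      (List.replicate n 0) (List.replicate m []) capacites
  (PySem.List.pyRange 0 (m : Int) 1).map (fun j =>
    (j, PySem.List.sorted2 (PySem.List.pyGetD final j []) (fun e => -(pvRank ranks j e))
      (fun e => e) false))

-- ===== PRECONDITION & SPEC =====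
-- Pre_ admits the trivial runs (no students, or no parcours: the loops do nothing) and otherwise
-- the natural well-formed instance: at least as many capacities as parcours, every preference row
-- of length ≥ m whose first m entries are parcours indices in range with positive capacity, and
-- every student present in the ranking of every parcours among those entries.  It excludes the
-- inputs where Python A raises (IndexError on CE[i][..] or the empty heap, KeyError on a missing
-- classement_parcours key or a negative parcours index), and — stated in claim.json "cites" — a
-- few inputs where A still returns because a malformed or zero-capacity parcours happens never to
-- be reached.
def Pre_gale_shapley_etudiants (CE : List (List Int)) (CP : List (List Int)) (capacites : List Int) : Prop :=
  CE = [] ∨ CP = [] ∨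
  (CP.length ≤ capacites.length ∧
   (∀ row ∈ CE, CP.length ≤ row.length ∧
     ∀ j ∈ row.take CP.length, 0 ≤ j ∧ j < (CP.length : Int) ∧ 1 ≤ PySem.List.pyGetD capacites j 0) ∧
   (∀ k : Nat, k < CE.length → ∀ j ∈ (CE.getD k []).take CP.length,
     (k : Int) ∈ PySem.List.pyGetD CP j []))

instance (CE : List (List Int)) (CP : List (List Int)) (capacites : List Int) :
    Decidable (Pre_gale_shapley_etudiants CE CP capacites) := by
  unfold Pre_gale_shapley_etudiants; infer_instance

def pvWitness_gale_shapley_etudiants : List (List Int) × List (List Int) × List Int :=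
  ([[0]], [[0]], [1])

def Spec_gale_shapley_etudiants (CE : List (List Int)) (CP : List (List Int)) (capacites : List Int) (out : List (Int × List Int)) : Prop := out = gale_shapley_etudiants_alt CE CP capacites
instance (CE : List (List Int)) (CP : List (List Int)) (capacites : List Int) (out : List (Int × List Int)) : Decidable (Spec_gale_shapley_etudiants CE CP capacites out) := by unfold Spec_gale_shapley_etudiants; infer_instance

-- ===== CLAIM (what is proved, stated in full; the proofs are below) =====
def Claim_equal_gale_shapley_etudiants : Prop := ∀ (CE : List (List Int)) (CP : List (List Int)) (capacites : List Int), Dom_gale_shapley_etudiants CE CP capacites → Pre_gale_shapley_etudiants CE CP capacites → Spec_gale_shapley_etudiants CE CP capacites (gale_shapley_etudiants CE CP capacites)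

-- ===== LEMMAS AND PROOFS =====

-- the pair (-rank, student) A stores in the heap for a student of B's plain list
def pvPair (ranks : List (PySem.Dict Int Int)) (j e : Int) : Int × Int := (-(pvRank ranks j e), e)

-- relation between A's heap lists and B's plain lists, plus the bookkeeping the simulation needs
def pvAffInv (ranks : List (PySem.Dict Int Int)) (capacites reste : List Int) (n : Int)
    (mlen : Nat) (A : List (List (Int × Int))) (B : List (List Int)) : Prop :=
  A.length = mlen ∧ B.length = mlen ∧ reste.length = capacites.length ∧
  ∀ k : Nat, k < mlen →
    (A.getD k []).Pairwise (fun a b => pvPairLe a b = true) ∧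
    (A.getD k []).Perm ((B.getD k []).map (pvPair ranks (k : Int))) ∧
    reste.getD k 0 = capacites.getD k 0 - ((B.getD k []).length : Int) ∧
    (∀ e ∈ B.getD k [], 0 ≤ e ∧ e < n)

-- remaining-proposal potential Σ_k (m - proch[k])⁺ that every proposal strictly decreases
def pvSig (m : Int) (proch : List Int) : Nat := (proch.map (fun p => (m - p).toNat)).sum

lemma pvGetD_set_self {α : Type} (l : List α) (n : Nat) (v d : α) (h : n < l.length) :
    (l.set n v).getD n d = v := by
  simp [List.getD_eq_getElem?_getD, h]

lemma pvGetD_set_ne {α : Type} (l : List α) (n k : Nat) (v d : α) (h : k ≠ n) :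
    (l.set n v).getD k d = l.getD k d := by
  simp [List.getD_eq_getElem?_getD, Ne.symm h]

lemma pvPairLe_iff (a b : Int × Int) :
    pvPairLe a b = true ↔ (a.1 < b.1 ∨ (a.1 = b.1 ∧ a.2 ≤ b.2)) := by
  simp [pvPairLe]

lemma pvPairLe_refl (a : Int × Int) : pvPairLe a a = true := by simp [pvPairLe_iff]

lemma pvPairLe_total (a b : Int × Int) : pvPairLe a b = true ∨ pvPairLe b a = true := by
  simp only [pvPairLe_iff]; omega

lemma pvPairLe_trans {a b c : Int × Int} (h1 : pvPairLe a b = true) (h2 : pvPairLe b c = true) :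
    pvPairLe a c = true := by
  simp only [pvPairLe_iff] at *; omega

lemma pvPairLe_antisymm {a b : Int × Int} (h1 : pvPairLe a b = true) (h2 : pvPairLe b a = true) :
    a = b := by
  simp only [pvPairLe_iff] at h1 h2
  have : a.1 = b.1 ∧ a.2 = b.2 := by omega
  exact Prod.ext this.1 this.2

lemma pvHeapPush_perm (x : Int × Int) (l : List (Int × Int)) :
    (pvHeapPush x l).Perm (x :: l) := by
  induction l with
  | nil => simp [pvHeapPush]
  | cons a t ih =>
    simp only [pvHeapPush]
    split
    · exact List.Perm.refl _
    · exact (ih.cons a).trans (List.Perm.swap x a t)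

lemma pvHeapPush_sorted (x : Int × Int) (l : List (Int × Int))
    (h : l.Pairwise (fun a b => pvPairLe a b = true)) :
    (pvHeapPush x l).Pairwise (fun a b => pvPairLe a b = true) := by
  induction l with
  | nil => simp [pvHeapPush]
  | cons a t ih =>
    rw [List.pairwise_cons] at h
    simp only [pvHeapPush]
    split
    · rename_i hxa
      refine List.pairwise_cons.mpr ⟨?_, List.pairwise_cons.mpr ⟨h.1, h.2⟩⟩
      intro y hy
      rcases List.mem_cons.mp hy with rfl | hy
      · exact hxa
      · exact pvPairLe_trans hxa (h.1 y hy)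
    · rename_i hxa
      have hax : pvPairLe a x = true := by
        rcases pvPairLe_total x a with h' | h'
        · exact absurd h' hxa
        · exact h'
      refine List.pairwise_cons.mpr ⟨?_, ih h.2⟩
      intro y hy
      rcases List.mem_cons.mp ((pvHeapPush_perm x t).mem_iff.mp hy) with rfl | hy
      · exact hax
      · exact h.1 y hy

-- the lexicographic '(k1, k2) below' relation the max() scan of B maximises
def pvLexLe (k1 k2 : Int → Int) (x w : Int) : Prop :=
  k1 x < k1 w ∨ (k1 x = k1 w ∧ k2 x ≤ k2 w)

-- the running-max step of PySem.List.max2?, named so it can be reasoned about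
def pvStep (k1 k2 : Int → Int) (acc : Option Int) (x : Int) : Option Int :=
  match acc with
  | none => some x
  | some a =>
    if (decide (k1 a < k1 x) || !decide (k1 x < k1 a) && decide (k2 a < k2 x)) = true then some x
    else some a

lemma pvMax2_eq_foldl (k1 k2 : Int → Int) (xs : List Int) :
    PySem.List.max2? xs k1 k2 = xs.foldl (pvStep k1 k2) none := by
  unfold PySem.List.max2?
  apply List.foldl_ext
  intro acc x _
  cases acc <;> rfl

-- specification of the running-max fold inside PySem.List.max2? (accumulator already some a)
lemma pvMax2_fold_spec (k1 k2 : Int → Int) :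
    ∀ (t : List Int) (a : Int), ∃ w,
      t.foldl (pvStep k1 k2) (some a) = some w ∧
      (w = a ∨ w ∈ t) ∧ pvLexLe k1 k2 a w ∧ ∀ e ∈ t, pvLexLe k1 k2 e w := by
  intro t
  induction t with
  | nil =>
    intro a
    exact ⟨a, rfl, Or.inl rfl, Or.inr ⟨rfl, le_refl _⟩, by simp⟩
  | cons x t ih =>
    intro a
    simp only [List.foldl_cons, pvStep]
    by_cases hc : (decide (k1 a < k1 x) || !decide (k1 x < k1 a) && decide (k2 a < k2 x)) = true
    · rw [if_pos hc]
      obtain ⟨w, heq, hmem, hxw, hall⟩ := ih x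
      simp only [Bool.or_eq_true, Bool.and_eq_true, Bool.not_eq_true', decide_eq_true_eq,
        decide_eq_false_iff_not, not_lt] at hc
      have hax : pvLexLe k1 k2 a x := by unfold pvLexLe; omega
      have haw : pvLexLe k1 k2 a w := by unfold pvLexLe at *; omega
      refine ⟨w, heq, ?_, haw, ?_⟩
      · rcases hmem with rfl | hm
        · exact Or.inr List.mem_cons_self
        · exact Or.inr (List.mem_cons_of_mem _ hm)
      · intro e he
        rcases List.mem_cons.mp he with rfl | he
        · exact hxw
        · exact hall e he
    · rw [if_neg hc]
      obtain ⟨w, heq, hmem, haw, hall⟩ := ih a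
      simp only [Bool.or_eq_true, Bool.and_eq_true, Bool.not_eq_true', decide_eq_true_eq,
        decide_eq_false_iff_not, not_or, not_and, not_lt] at hc
      have hxa : pvLexLe k1 k2 x a := by unfold pvLexLe; omega
      have hxw : pvLexLe k1 k2 x w := by unfold pvLexLe at *; omega
      refine ⟨w, heq, ?_, haw, ?_⟩
      · rcases hmem with rfl | hm
        · exact Or.inl rfl
        · exact Or.inr (List.mem_cons_of_mem _ hm)
      · intro e he
        rcases List.mem_cons.mp he with rfl | he
        · exact hxw
        · exact hall e he

lemma pvMax2_spec (k1 k2 : Int → Int) (h0 : Int) (t : List Int) :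
    ∃ w, PySem.List.max2? (h0 :: t) k1 k2 = some w ∧ w ∈ h0 :: t ∧
      ∀ e ∈ h0 :: t, pvLexLe k1 k2 e w := by
  obtain ⟨w, heq, hmem, h0w, hall⟩ := pvMax2_fold_spec k1 k2 t h0
  refine ⟨w, ?_, ?_, ?_⟩
  · rw [pvMax2_eq_foldl, List.foldl_cons]
    exact heq
  · rcases hmem with rfl | hm
    · exact List.mem_cons_self
    · exact List.mem_cons_of_mem _ hm
  · intro e he
    rcases List.mem_cons.mp he with rfl | he
    · exact h0w
    · exact hall e he

lemma pvPair_inj (ranks : List (PySem.Dict Int Int)) (j : Int) :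
    Function.Injective (pvPair ranks j) := by
  intro a b h
  exact congrArg Prod.snd h

lemma pvHead_min {pA : Int × Int} {tA : List (Int × Int)}
    (h : (pA :: tA).Pairwise (fun a b => pvPairLe a b = true)) :
    ∀ y ∈ pA :: tA, pvPairLe pA y = true := by
  intro y hy
  rcases List.mem_cons.mp hy with rfl | hy
  · exact pvPairLe_refl _
  · exact (List.pairwise_cons.mp h).1 y hy

-- the head of A's ordered heap list is exactly the (-rank, id) pair of B's max(key=(rank,-id))
lemma pvTop_eq_max (ranks : List (PySem.Dict Int Int)) (j : Int)
    {B' : List Int} {pA : Int × Int} {tA : List (Int × Int)} {w : Int}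
    (hS : (pA :: tA).Pairwise (fun a b => pvPairLe a b = true))
    (hperm : (pA :: tA).Perm (B'.map (pvPair ranks j)))
    (hwmem : w ∈ B')
    (hall : ∀ e ∈ B', pvLexLe (fun e => pvRank ranks j e) (fun e => -e) e w) :
    pA = pvPair ranks j w := by
  have hwlow : ∀ e ∈ B', pvPairLe (pvPair ranks j w) (pvPair ranks j e) = true := by
    intro e he
    have := hall e he
    simp only [pvLexLe] at this
    simp only [pvPair, pvPairLe_iff]
    omega
  have hpairw_mem : pvPair ranks j w ∈ pA :: tA :=
    hperm.mem_iff.mpr (List.mem_map_of_mem hwmem)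
  have h1 : pvPairLe pA (pvPair ranks j w) = true := pvHead_min hS _ hpairw_mem
  have hpA_mem : pA ∈ B'.map (pvPair ranks j) := hperm.mem_iff.mp List.mem_cons_self
  obtain ⟨e, he_mem, he_eq⟩ := List.mem_map.mp hpA_mem
  have h2 : pvPairLe (pvPair ranks j w) pA = true := he_eq ▸ hwlow e he_mem
  exact pvPairLe_antisymm h1 h2

-- getD of a replicate with the same default is that default
lemma pvGetD_replicate {α : Type} (n k : Nat) (d : α) : (List.replicate n d).getD k d = d := by
  simp only [List.getD_eq_getElem?_getD, List.getElem?_replicate]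
  split <;> rfl

-- advancing one in-range prochain entry that is still below m lowers the potential by exactly one
lemma pvSig_set (m : Int) (proch : List Int) (k : Nat) (p : Int)
    (hk : k < proch.length) (hp : proch.getD k 0 = p) (hpm : p < m) :
    pvSig m (proch.set k (p + 1)) + 1 = pvSig m proch := by
  induction proch generalizing k with
  | nil => simp at hk
  | cons a t ih =>
    cases k with
    | zero =>
      simp only [List.getD_cons_zero] at hp
      subst hp
      simp only [List.set_cons_zero, pvSig, List.map_cons, List.sum_cons]
      omega
    | succ k' =>
      simp only [List.getD_cons_succ] at hp
      simp only [List.length_cons] at hk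
      have := ih k' (by omega) hp
      simp only [List.set_cons_succ, pvSig, List.map_cons, List.sum_cons] at *
      omega

-- one full A-outer step (inner proposal loop of student i) corresponds to a run of B's flat loop
-- that removes i from the head of the queue and appends the displaced student, if any
lemma pvInner_flat (CE : List (List Int)) (CP : List (List Int)) (capacites : List Int)
    (hclen : CP.length ≤ capacites.length)
    (hrows : ∀ row ∈ CE, CP.length ≤ row.length ∧
      ∀ j ∈ row.take CP.length, 0 ≤ j ∧ j < (CP.length : Int) ∧ 1 ≤ PySem.List.pyGetD capacites j 0)
    (i : Int) (hi0 : 0 ≤ i) (hin : i < (CE.length : Int)) :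
    ∀ (fuelI : Nat) (proch reste : List Int) (A : List (List (Int × Int))) (B : List (List Int))
      (rest : List Int) (fuelB : Nat)
      (pA' rA' : List Int) (aA' : List (List (Int × Int))) (dA' : Option Int),
      ((CP.length : Int) - PySem.List.pyGetD proch i 0).toNat < fuelI →
      (∀ k : Nat, 0 ≤ proch.getD k 0) →
      proch.length = CE.length →
      pvAffInv (pvRanks CP) capacites reste (CE.length : Int) CP.length A B →
      (i :: rest).length + 2 * pvSig (CP.length : Int) proch < fuelB →
      pvInnerA CE (pvRanks CP) (CP.length : Int) i fuelI proch A reste = (pA', aA', rA', dA') →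
      ∃ (aB' : List (List Int)) (fuelB' : Nat),
        pvFlatB CE (pvRanks CP) (CP.length : Int) fuelB (i :: rest) proch B reste
          = pvFlatB CE (pvRanks CP) (CP.length : Int) fuelB' (rest ++ dA'.toList) pA' aB' rA' ∧
        (∀ k : Nat, 0 ≤ pA'.getD k 0) ∧ pA'.length = CE.length ∧
        pvAffInv (pvRanks CP) capacites rA' (CE.length : Int) CP.length aA' aB' ∧
        (∀ d ∈ dA', 0 ≤ d ∧ d < (CE.length : Int)) ∧
        (rest ++ dA'.toList).length + 2 * pvSig (CP.length : Int) pA' < fuelB' ∧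
        (rest ++ dA'.toList).length + pvSig (CP.length : Int) pA'
          < (i :: rest).length + pvSig (CP.length : Int) proch := by
  intro fuelI
  induction fuelI with
  | zero =>
    intro proch reste A B rest fuelB pA' rA' aA' dA' hfI
    omega
  | succ fuelI ih =>
    intro proch reste A B rest fuelB pA' rA' aA' dA' hfI hproch hplen hinv hfB hEA
    obtain ⟨fb, rfl⟩ : ∃ fb, fuelB = fb + 1 := by
      cases fuelB with
      | zero => simp at hfB
      | succ fb => exact ⟨fb, rfl⟩
    simp only [pvInnerA] at hEA
    simp only [pvFlatB]
    by_cases hguard : PySem.List.pyGetD proch i 0 < (CP.length : Int)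
    · rw [if_pos hguard] at hEA ⊢
      -- facts about i, the current proposal index, and j
      have hiR : PySem.Raise.InRange CE.length i := ⟨by omega, hin⟩
      have hrowmem : PySem.List.pyGetD CE i [] ∈ CE := PySem.List.pyGetD_mem CE [] hiR
      obtain ⟨hrlen, hrj⟩ := hrows _ hrowmem
      have hP0 : 0 ≤ PySem.List.pyGetD proch i 0 := by
        rw [PySem.List.pyGetD_of_nonneg proch 0 hi0]; exact hproch i.toNat
      have hpn : (PySem.List.pyGetD proch i 0).toNat < CP.length := by omega
      have hpnrow : (PySem.List.pyGetD proch i 0).toNat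
          < (PySem.List.pyGetD CE i []).length := by omega
      have hjmem : PySem.List.pyGetD (PySem.List.pyGetD CE i [])
          (PySem.List.pyGetD proch i 0) 0 ∈ (PySem.List.pyGetD CE i []).take CP.length := by
        rw [PySem.List.pyGetD_of_nonneg _ 0 hP0, List.getD_eq_getElem _ _ hpnrow]
        have hlt : (PySem.List.pyGetD proch i 0).toNat
            < ((PySem.List.pyGetD CE i []).take CP.length).length := by
          simp only [List.length_take]
          omega
        have := List.getElem_take (xs := PySem.List.pyGetD CE i []) (h := hlt)
        rw [← this]
        exact List.getElem_mem _
      obtain ⟨hj0, hjM, hjcap⟩ := hrj _ hjmem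
      set j := PySem.List.pyGetD (PySem.List.pyGetD CE i [])
        (PySem.List.pyGetD proch i 0) 0 with hjdef
      set jn := j.toNat with hjndef
      have hjn : (jn : Int) = j := Int.toNat_of_nonneg hj0
      have hjnlt : jn < CP.length := by omega
      have hjncap : jn < capacites.length := by omega
      obtain ⟨hAlen, hBlen, hRlen, hk⟩ := hinv
      obtain ⟨hSjn, hPermjn, hCapjn, hMemjn⟩ := hk jn hjnlt
      rw [hjn] at hPermjn
      have hgR : PySem.List.pyGetD reste j 0 = reste.getD jn 0 :=
        PySem.List.pyGetD_of_nonneg reste 0 hj0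
      have hgA : PySem.List.pyGetD A j [] = A.getD jn [] :=
        PySem.List.pyGetD_of_nonneg A [] hj0
      have hgB : PySem.List.pyGetD B j [] = B.getD jn [] :=
        PySem.List.pyGetD_of_nonneg B [] hj0
      have hgC : PySem.List.pyGetD capacites j 0 = capacites.getD jn 0 :=
        PySem.List.pyGetD_of_nonneg capacites 0 hj0
      have hsA : ∀ v, PySem.List.pySetD A j v = A.set jn v :=
        fun v => PySem.List.pySetD_of_nonneg A v hj0
      have hsB : ∀ v, PySem.List.pySetD B j v = B.set jn v :=
        fun v => PySem.List.pySetD_of_nonneg B v hj0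
      have hsR : ∀ v, PySem.List.pySetD reste j v = reste.set jn v :=
        fun v => PySem.List.pySetD_of_nonneg reste v hj0
      have hitn : i.toNat < proch.length := by omega
      have hgPi : proch.getD i.toNat 0 = PySem.List.pyGetD proch i 0 :=
        (PySem.List.pyGetD_of_nonneg proch 0 hi0).symm
      have hsP : PySem.List.pySetD proch i (PySem.List.pyGetD proch i 0 + 1)
          = proch.set i.toNat (PySem.List.pyGetD proch i 0 + 1) :=
        PySem.List.pySetD_of_nonneg proch _ hi0
      have hSig : pvSig (CP.length : Int)
          (proch.set i.toNat (PySem.List.pyGetD proch i 0 + 1)) + 1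
          = pvSig (CP.length : Int) proch :=
        pvSig_set _ proch i.toNat _ hitn hgPi hguard
      have hproch' : ∀ k : Nat,
          0 ≤ (PySem.List.pySetD proch i (PySem.List.pyGetD proch i 0 + 1)).getD k 0 := by
        intro k
        rw [hsP]
        by_cases hk1 : k = i.toNat
        · subst hk1
          rw [pvGetD_set_self _ _ _ _ hitn]
          omega
        · rw [pvGetD_set_ne _ _ _ _ _ hk1]
          exact hproch k
      have hplen' : (PySem.List.pySetD proch i (PySem.List.pyGetD proch i 0 + 1)).length
          = CE.length := by rw [hsP, List.length_set]; exact hplen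
      by_cases hcap : 0 < PySem.List.pyGetD reste j 0
      · rw [if_pos hcap] at hEA ⊢
        simp only [Prod.mk.injEq] at hEA
        obtain ⟨rfl, rfl, rfl, rfl⟩ := hEA
        refine ⟨PySem.List.pySetD B j (PySem.List.pyGetD B j [] ++ [i]), fb, by simp, hproch',
          hplen', ?_, by simp, ?_, ?_⟩
        · rw [hsA, hsB, hsR, hgA, hgB, hgR]
          refine ⟨by simp [hAlen], by simp [hBlen], by simp [hRlen], ?_⟩
          intro k hklt
          by_cases hkj : k = jn
          · subst hkj
            rw [pvGetD_set_self _ _ _ _ (by omega : jn < A.length),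
                pvGetD_set_self _ _ _ _ (by omega : jn < B.length),
                pvGetD_set_self _ _ _ _ (by omega : jn < reste.length), hjn]
            refine ⟨pvHeapPush_sorted _ _ hSjn, ?_, ?_, ?_⟩
            · refine (pvHeapPush_perm _ _).trans ?_
              rw [List.map_append]
              simp only [List.map_cons, List.map_nil]
              refine (hPermjn.cons _).trans ?_
              exact (List.perm_append_singleton _ _).symm
            · rw [hgR] at hcap
              rw [hgC] at hjcap
              simp only [List.length_append, List.length_cons, List.length_nil]
              push_cast
              omega
            · intro e he
              rcases List.mem_append.mp he with he | he
              · exact hMemjn e he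
              · simp only [List.mem_singleton] at he; subst he; exact ⟨hi0, hin⟩
          · rw [pvGetD_set_ne _ _ _ _ _ hkj, pvGetD_set_ne _ _ _ _ _ hkj,
                pvGetD_set_ne _ _ _ _ _ hkj]
            exact hk k hklt
        · simp only [Option.toList_none, List.append_nil, List.length_cons] at hfB ⊢
          rw [hsP]
          omega
        · simp only [Option.toList_none, List.append_nil, List.length_cons]
          rw [hsP]
          omega
      · rw [if_neg hcap] at hEA ⊢
        -- the parcours is full: its list is nonempty
        rw [hgR] at hcap
        rw [hgC] at hjcap
        have hlenB : 1 ≤ (B.getD jn []).length := by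
          have := hCapjn
          omega
        obtain ⟨hBh, tB, hBeq⟩ := List.exists_cons_of_ne_nil
          (by intro h; rw [h] at hlenB; simp at hlenB : B.getD jn [] ≠ [])
        have hlenA : (A.getD jn []).length = (B.getD jn []).length := by
          rw [hPermjn.length_eq, List.length_map]
        obtain ⟨pA0, tA, hAeq⟩ := List.exists_cons_of_ne_nil
          (by intro h; rw [h, hBeq] at hlenA; simp at hlenA : A.getD jn [] ≠ [])
        rw [hgA, hAeq] at hEA
        rw [hgB, hBeq]
        obtain ⟨w, hwEq, hwMem, hwAll⟩ :=
          pvMax2_spec (fun e => pvRank (pvRanks CP) j e) (fun e => -e) hBh tB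
        rw [hwEq]
        simp only []
        rw [hAeq] at hSjn
        rw [hAeq, hBeq] at hPermjn
        have htop : pA0 = pvPair (pvRanks CP) j w :=
          pvTop_eq_max (pvRanks CP) j hSjn hPermjn hwMem hwAll
        simp only [List.headD_cons, htop, pvPair, neg_neg] at hEA
        have hwB : w ∈ B.getD jn [] := hBeq ▸ hwMem
        by_cases hdisp : pvRank (pvRanks CP) j i < pvRank (pvRanks CP) j w
        · rw [if_pos hdisp] at hEA ⊢
          simp only [Prod.mk.injEq] at hEA
          obtain ⟨rfl, rfl, rfl, rfl⟩ := hEA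
          rw [PySem.List.remove?_eq_some_erase _ w hwMem]
          refine ⟨PySem.List.pySetD B j ((hBh :: tB).erase w ++ [i]), fb, rfl, hproch',
            hplen', ?_, ?_, ?_, ?_⟩
          · rw [hsA, hsB]
            refine ⟨by simp [hAlen], by simp [hBlen], hRlen, ?_⟩
            intro k hklt
            by_cases hkj : k = jn
            · subst hkj
              rw [pvGetD_set_self _ _ _ _ (by omega : jn < A.length),
                  pvGetD_set_self _ _ _ _ (by omega : jn < B.length), hjn]
              have hStA : tA.Pairwise (fun a b => pvPairLe a b = true) :=
                (List.pairwise_cons.mp hSjn).2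
              refine ⟨pvHeapPush_sorted _ _ hStA, ?_, ?_, ?_⟩
              · have htA : tA.Perm (((hBh :: tB).map (pvPair (pvRanks CP) j)).erase pA0) := by
                  have := hPermjn.erase pA0
                  rwa [List.erase_cons_head] at this
                rw [List.map_append, List.map_erase (pvPair_inj (pvRanks CP) j)]
                refine (pvHeapPush_perm _ _).trans ?_
                refine ((htA.cons _).trans ?_)
                rw [htop]
                exact (List.perm_append_singleton _ _).symm
              · rw [hBeq] at hCapjn
                simp only [List.length_append, List.length_cons, List.length_nil]
                rw [List.length_erase_of_mem hwMem]
                simp only [List.length_cons] at hCapjn ⊢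
                push_cast
                omega
              · intro e he
                rcases List.mem_append.mp he with he | he
                · exact hMemjn e (hBeq ▸ List.mem_of_mem_erase he)
                · simp only [List.mem_singleton] at he; subst he; exact ⟨hi0, hin⟩
            · rw [pvGetD_set_ne _ _ _ _ _ hkj, pvGetD_set_ne _ _ _ _ _ hkj]
              exact hk k hklt
          · intro d hd
            simp only [Option.mem_def, Option.some.injEq] at hd
            subst hd
            exact hMemjn w hwB
          · simp only [Option.toList_some, List.length_append, List.length_cons,
              List.length_nil] at hfB ⊢
            rw [hsP]
            omega
          · simp only [Option.toList_some, List.length_append, List.length_cons,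
              List.length_nil]
            rw [hsP]
            omega
        · rw [if_neg hdisp] at hEA ⊢
          have hfI' : ((CP.length : Int)
              - PySem.List.pyGetD (PySem.List.pySetD proch i (PySem.List.pyGetD proch i 0 + 1)) i 0).toNat
              < fuelI := by
            rw [hsP, PySem.List.pyGetD_of_nonneg _ 0 hi0,
              pvGetD_set_self _ _ _ _ hitn]
            omega
          have hfB' : (i :: rest).length + 2 * pvSig (CP.length : Int)
              (PySem.List.pySetD proch i (PySem.List.pyGetD proch i 0 + 1)) < fb := by
            simp only [List.length_cons] at hfB ⊢
            rw [hsP]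
            omega
          obtain ⟨aB', fuelB', hBeq', h1, h2, h3, h4, h5, h6⟩ :=
            ih _ reste A B rest fb pA' rA' aA' dA' hfI' hproch' hplen'
              ⟨hAlen, hBlen, hRlen, hk⟩ hfB' hEA
          refine ⟨aB', fuelB', hBeq', h1, h2, h3, h4, h5, ?_⟩
          have : (i :: rest).length + pvSig (CP.length : Int)
              (PySem.List.pySetD proch i (PySem.List.pyGetD proch i 0 + 1))
              < (i :: rest).length + pvSig (CP.length : Int) proch := by
            rw [hsP]
            omega
          omega
    · rw [if_neg hguard] at hEA ⊢
      simp only [Prod.mk.injEq] at hEA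
      obtain ⟨rfl, rfl, rfl, rfl⟩ := hEA
      refine ⟨B, fb, by simp, hproch, hplen, hinv, by simp, ?_, ?_⟩
      · simp only [Option.toList_none, List.append_nil, List.length_cons] at hfB ⊢
        omega
      · simp

-- whole-run simulation: A's nested loops and B's flat loop end with related affectation tables
lemma pvOuter_flat_sim (CE CP : List (List Int)) (capacites : List Int)
    (hclen : CP.length ≤ capacites.length)
    (hrows : ∀ row ∈ CE, CP.length ≤ row.length ∧
      ∀ j ∈ row.take CP.length, 0 ≤ j ∧ j < (CP.length : Int) ∧ 1 ≤ PySem.List.pyGetD capacites j 0) :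
    ∀ (fuelA : Nat) (libres proch reste : List Int)
      (A : List (List (Int × Int))) (B : List (List Int)) (fuelB : Nat),
      (∀ x ∈ libres, 0 ≤ x ∧ x < (CE.length : Int)) →
      (∀ k : Nat, 0 ≤ proch.getD k 0) →
      proch.length = CE.length →
      pvAffInv (pvRanks CP) capacites reste (CE.length : Int) CP.length A B →
      libres.length + pvSig (CP.length : Int) proch < fuelA →
      libres.length + 2 * pvSig (CP.length : Int) proch < fuelB →
      ∀ k : Nat, k < CP.length →
        ((pvOuterA CE (pvRanks CP) (CP.length : Int) fuelA libres proch A reste).getD k []).Pairwise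
          (fun a b => pvPairLe a b = true) ∧
        ((pvOuterA CE (pvRanks CP) (CP.length : Int) fuelA libres proch A reste).getD k []).Perm
          (((pvFlatB CE (pvRanks CP) (CP.length : Int) fuelB libres proch B reste).getD k []).map
            (pvPair (pvRanks CP) (k : Int))) := by
  intro fuelA
  induction fuelA with
  | zero =>
    intro libres proch reste A B fuelB hlib hproch hplen hinv hfA
    omega
  | succ fuelA ih =>
    intro libres proch reste A B fuelB hlib hproch hplen hinv hfA hfB k hklt
    cases libres with
    | nil =>
      have hBend : pvFlatB CE (pvRanks CP) (CP.length : Int) fuelB [] proch B reste = B := by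
        cases fuelB <;> simp [pvFlatB]
      simp only [pvOuterA, hBend]
      exact ⟨(hinv.2.2.2 k hklt).1, (hinv.2.2.2 k hklt).2.1⟩
    | cons i rest =>
      obtain ⟨hi0, hin⟩ := hlib i List.mem_cons_self
      obtain ⟨⟨pA', aA', rA', dA'⟩, hRA⟩ : ∃ x, pvInnerA CE (pvRanks CP) (CP.length : Int) i
          ((CP.length : Int).toNat + 1) proch A reste = x := ⟨_, rfl⟩
      have hfI : ((CP.length : Int) - PySem.List.pyGetD proch i 0).toNat
          < (CP.length : Int).toNat + 1 := by
        have : 0 ≤ PySem.List.pyGetD proch i 0 := by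
          rw [PySem.List.pyGetD_of_nonneg proch 0 hi0]; exact hproch i.toNat
        omega
      obtain ⟨aB', fuelB', hBeq, hproch2, hplen2, hinv2, hdval, hfB2, hmuA⟩ :=
        pvInner_flat CE CP capacites hclen hrows i hi0 hin _ proch reste A B rest fuelB
          _ _ _ _ hfI hproch hplen hinv hfB hRA
      have hlib' : ∀ x ∈ rest ++ dA'.toList, 0 ≤ x ∧ x < (CE.length : Int) := by
        intro x hx
        rcases List.mem_append.mp hx with hx | hx
        · exact hlib x (List.mem_cons_of_mem _ hx)
        · rcases dA' with _ | d
          · simp at hx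
          · simp only [Option.toList_some, List.mem_singleton] at hx
            rw [hx]
            exact hdval d rfl
      have hfA' : (rest ++ dA'.toList).length + pvSig (CP.length : Int) pA' < fuelA := by
        simp only [List.length_cons] at hfA hmuA
        omega
      simp only [pvOuterA, hRA, hBeq]
      exact ih (rest ++ dA'.toList) pA' rA' aA' aB' fuelB' hlib' hproch2 hplen2 hinv2 hfA' hfB2
        k hklt

-- stable insertion of x at the end of an already-ordered accumulator (A-side final sort)
lemma pvFoldl_insertBy_fix (bfr : (Int × Int) → (Int × Int) → Bool)
    (hcompat : ∀ a b : Int × Int, pvPairLe a b = true → bfr b a = false) :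
    ∀ (l acc : List (Int × Int)),
      acc.Pairwise (fun a b => pvPairLe a b = true) →
      l.Pairwise (fun a b => pvPairLe a b = true) →
      (∀ a ∈ acc, ∀ b ∈ l, pvPairLe a b = true) →
      l.foldl (fun acc x => PySem.List.insertBy bfr x acc) acc = acc ++ l := by
  intro l
  induction l with
  | nil => intro acc _ _ _; simp
  | cons x l' ihl =>
    intro acc hacc hl hcross
    simp only [List.foldl_cons]
    have hins : PySem.List.insertBy bfr x acc = acc ++ [x] :=
      PySem.List.insertBy_of_forall_not_before bfr x acc
        (fun y hy => hcompat y x (hcross y hy x List.mem_cons_self))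
    rw [hins, ihl (acc ++ [x]) ?_ ?_ ?_]
    · simp
    · refine List.pairwise_append.mpr ⟨hacc, List.pairwise_singleton _ _, ?_⟩
      intro a ha b hb
      simp only [List.mem_singleton] at hb
      rw [hb]
      exact hcross a ha x List.mem_cons_self
    · exact (List.pairwise_cons.mp hl).2
    · intro a ha b hb
      rcases List.mem_append.mp ha with ha | ha
      · exact hcross a ha b (List.mem_cons_of_mem _ hb)
      · simp only [List.mem_singleton] at ha
        rw [ha]
        exact (List.pairwise_cons.mp hl).1 b hb

-- sorting A's already-ordered heap list is the identity
lemma pvSorted2A_fix (A' : List (Int × Int))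
    (hS : A'.Pairwise (fun a b => pvPairLe a b = true)) :
    PySem.List.sorted2 A' (fun p => p.1) (fun p => p.2) false = A' := by
  have hcompat : ∀ a b : Int × Int, pvPairLe a b = true →
      (decide ((fun p : Int × Int => p.1) b < (fun p : Int × Int => p.1) a) ||
        (!decide ((fun p : Int × Int => p.1) a < (fun p : Int × Int => p.1) b) &&
          decide ((fun p : Int × Int => p.2) b < (fun p : Int × Int => p.2) a))) = false := by
    intro a b h
    have hh := (pvPairLe_iff a b).mp h
    have h1 : ¬ b.1 < a.1 := by omega
    rcases lt_or_ge a.1 b.1 with hlt | hle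
    · simp [h1, hlt]
    · have h3 : ¬ b.2 < a.2 := by omega
      simp [h1, h3]
  have h := pvFoldl_insertBy_fix _ hcompat A' [] (List.Pairwise.nil) hS (by simp)
  calc PySem.List.sorted2 A' (fun p => p.1) (fun p => p.2) false
      = A'.foldl (fun acc x => PySem.List.insertBy
          (fun a b => decide ((fun p : Int × Int => p.1) a < (fun p : Int × Int => p.1) b) ||
            (!decide ((fun p : Int × Int => p.1) b < (fun p : Int × Int => p.1) a) &&
              decide ((fun p : Int × Int => p.2) a < (fun p : Int × Int => p.2) b))) x acc) [] := rfl
    _ = [] ++ A' := h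
    _ = A' := by simp

-- the lexicographic key B's final sort orders by
def pvKey (ranks : List (PySem.Dict Int Int)) (j : Int) (e : Int) : Lex (Int × Int) :=
  toLex (-(pvRank ranks j e), e)

lemma pvInsertBy_sorted (ranks : List (PySem.Dict Int Int)) (j : Int) (bfr : Int → Int → Bool)
    (hbfr : ∀ a b, bfr a b = true ↔ pvKey ranks j a < pvKey ranks j b) :
    ∀ (l : List Int), l.Pairwise (fun a b => pvKey ranks j a ≤ pvKey ranks j b) → ∀ x,
      (PySem.List.insertBy bfr x l).Pairwise (fun a b => pvKey ranks j a ≤ pvKey ranks j b) := by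
  intro l
  induction l with
  | nil => intro _ x; simp [PySem.List.insertBy]
  | cons a t ih =>
    intro hl x
    simp only [PySem.List.insertBy]
    split
    · rename_i hxa
      rw [hbfr] at hxa
      refine List.pairwise_cons.mpr ⟨?_, hl⟩
      intro y hy
      rcases List.mem_cons.mp hy with rfl | hy
      · exact le_of_lt hxa
      · exact le_trans (le_of_lt hxa) ((List.pairwise_cons.mp hl).1 y hy)
    · rename_i hxa
      have hax : pvKey ranks j a ≤ pvKey ranks j x :=
        le_of_not_gt (fun hgt => hxa ((hbfr x a).mpr hgt))
      refine List.pairwise_cons.mpr ⟨?_, ih (List.pairwise_cons.mp hl).2 x⟩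
      intro y hy
      rcases List.mem_cons.mp ((PySem.List.insertBy_perm bfr x t).mem_iff.mp hy) with rfl | hy
      · exact hax
      · exact (List.pairwise_cons.mp hl).1 y hy

lemma pvFoldlInsert_sorted (ranks : List (PySem.Dict Int Int)) (j : Int) (bfr : Int → Int → Bool)
    (hbfr : ∀ a b, bfr a b = true ↔ pvKey ranks j a < pvKey ranks j b) :
    ∀ (l acc : List Int), acc.Pairwise (fun a b => pvKey ranks j a ≤ pvKey ranks j b) →
      (l.foldl (fun acc x => PySem.List.insertBy bfr x acc) acc).Pairwise
        (fun a b => pvKey ranks j a ≤ pvKey ranks j b) := by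
  intro l
  induction l with
  | nil => intro acc h; simpa using h
  | cons x l' ihl =>
    intro acc h
    simp only [List.foldl_cons]
    exact ihl _ (pvInsertBy_sorted ranks j bfr hbfr acc h x)

-- the per-parcours rendering of both results agrees
lemma pvRender (ranks : List (PySem.Dict Int Int)) (j : Int) (A' : List (Int × Int)) (B' : List Int)
    (hS : A'.Pairwise (fun a b => pvPairLe a b = true))
    (hperm : A'.Perm (B'.map (pvPair ranks j))) :
    (PySem.List.sorted2 A' (fun p => p.1) (fun p => p.2) false).map (fun p => p.2)
      = PySem.List.sorted2 B' (fun e => -(pvRank ranks j e)) (fun e => e) false := by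
  rw [pvSorted2A_fix A' hS]
  have hshape : ∀ a ∈ A', a.1 = -(pvRank ranks j a.2) := by
    intro a ha
    obtain ⟨e, _, heq⟩ := List.mem_map.mp (hperm.mem_iff.mp ha)
    rw [← heq]
    rfl
  refine PySem.List.eq_of_perm_of_pairwise_le_of_injective (pvKey ranks j) ?_ ?_ ?_ ?_
  · intro a b h
    have := congrArg (fun x => (ofLex x).2) h
    simpa [pvKey] using this
  · refine ((hperm.map (fun p : Int × Int => p.2)).trans ?_).trans
      (PySem.List.sorted2_perm B' _ _ _).symm
    rw [List.map_map]
    have : ((fun p : Int × Int => p.2) ∘ pvPair ranks j) = fun e => e := rfl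
    rw [this, List.map_id']
  · rw [List.pairwise_map]
    refine hS.imp_of_mem ?_
    intro a b ha hb hab
    simp only [pvKey, Prod.Lex.le_iff, ofLex_toLex]
    rw [← hshape a ha, ← hshape b hb]
    exact pvPairLe_iff a b |>.mp hab
  · have hbfr : ∀ a b : Int,
        (decide ((fun e => -(pvRank ranks j e)) a < (fun e => -(pvRank ranks j e)) b) ||
          (!decide ((fun e => -(pvRank ranks j e)) b < (fun e => -(pvRank ranks j e)) a) &&
            decide ((fun e : Int => e) a < (fun e : Int => e) b))) = true ↔
          pvKey ranks j a < pvKey ranks j b := by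
      intro a b
      simp only [Bool.or_eq_true, Bool.and_eq_true, Bool.not_eq_true', decide_eq_true_eq,
        decide_eq_false_iff_not, not_lt, pvKey, Prod.Lex.lt_iff, ofLex_toLex]
      omega
    have := pvFoldlInsert_sorted ranks j _ hbfr B' [] List.Pairwise.nil
    exact this

-- ===== VERDICT (by name: the statement is the Claim_ definition above) =====
theorem gale_shapley_etudiants_spec : Claim_equal_gale_shapley_etudiants := by
  intro CE CP capacites hDom hPre
  unfold Spec_gale_shapley_etudiants
  rcases hPre with rfl | rfl | ⟨hclen, hrows, hmem⟩
  · -- no students: both loops do nothing and every parcours renders []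
    simp only [gale_shapley_etudiants, gale_shapley_etudiants_alt, List.length_nil,
      Nat.zero_mul, Nat.mul_zero]
    have hr0 : PySem.List.pyRange 0 ((0 : Nat) : Int) 1 = [] := by
      rw [PySem.List.pyRange_one]; simp
    rw [hr0]
    refine List.map_congr_left ?_
    intro j hj
    obtain ⟨hj0, hjM⟩ := PySem.List.mem_pyRange_one.mp hj
    simp only [pvOuterA, pvFlatB]
    rw [PySem.List.pyGetD_of_nonneg _ _ hj0, PySem.List.pyGetD_of_nonneg _ _ hj0,
      pvGetD_replicate, pvGetD_replicate]
    rfl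
  · -- no parcours: both results are the empty map over range(0)
    simp only [gale_shapley_etudiants, gale_shapley_etudiants_alt, List.length_nil]
    have hr0 : PySem.List.pyRange 0 ((0 : Nat) : Int) 1 = [] := by
      rw [PySem.List.pyRange_one]; simp
    rw [hr0]
    simp
  simp only [gale_shapley_etudiants, gale_shapley_etudiants_alt]
  refine List.map_congr_left ?_
  intro j hj
  obtain ⟨hj0, hjM⟩ := PySem.List.mem_pyRange_one.mp hj
  have hjn : ((j.toNat : Nat) : Int) = j := Int.toNat_of_nonneg hj0
  have hjnlt : j.toNat < CP.length := by omega
  have hinv0 : pvAffInv (pvRanks CP) capacites capacites (CE.length : Int) CP.length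
      (List.replicate CP.length []) (List.replicate CP.length []) := by
    refine ⟨by simp [hclen], by simp [hclen], rfl, ?_⟩
    intro k hklt
    rw [pvGetD_replicate, pvGetD_replicate]
    exact ⟨List.Pairwise.nil, List.Perm.refl _, by simp, by simp⟩
  have hlib0 : ∀ x ∈ PySem.List.pyRange 0 (CE.length : Int) 1, 0 ≤ x ∧ x < (CE.length : Int) := by
    intro x hx
    exact PySem.List.mem_pyRange_one.mp hx
  have hproch0 : ∀ k : Nat, 0 ≤ (List.replicate CE.length (0 : Int)).getD k 0 := by
    intro k
    rw [pvGetD_replicate]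
  have hSig0 : pvSig (CP.length : Int) (List.replicate CE.length 0) = CE.length * CP.length := by
    simp [pvSig, List.map_replicate, List.sum_replicate, smul_eq_mul]
  have hfA0 : (PySem.List.pyRange 0 (CE.length : Int) 1).length
      + pvSig (CP.length : Int) (List.replicate CE.length 0)
      < CE.length * CP.length + CE.length + 1 := by
    rw [hSig0, PySem.List.length_pyRange_one]
    omega
  have hfB0 : (PySem.List.pyRange 0 (CE.length : Int) 1).length
      + 2 * pvSig (CP.length : Int) (List.replicate CE.length 0)
      < 2 * (CE.length * CP.length) + CE.length + 1 := by
    rw [hSig0, PySem.List.length_pyRange_one]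
    omega
  obtain ⟨hSf, hPermf⟩ := pvOuter_flat_sim CE CP capacites hclen hrows
    (CE.length * CP.length + CE.length + 1) (PySem.List.pyRange 0 (CE.length : Int) 1)
    (List.replicate CE.length 0) capacites (List.replicate CP.length [])
    (List.replicate CP.length []) (2 * (CE.length * CP.length) + CE.length + 1)
    hlib0 hproch0 (by simp) hinv0 hfA0 hfB0 j.toNat hjnlt
  rw [hjn] at hPermf
  simp only [Prod.mk.injEq]
  refine ⟨trivial, ?_⟩
  rw [PySem.List.pyGetD_of_nonneg _ _ hj0, PySem.List.pyGetD_of_nonneg _ _ hj0]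
  exact pvRender (pvRanks CP) j _ _ hSf hPermf
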